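-- pv_equiv track=rewrite | github.com/GlennEriss/songo-model-stockfish-for-google-collab | src/songo_model_stockfish/reference_songo/engine.py | can_transmit
-- ===== SOURCE A (Python) =====
-- from typing import Dict, List, Optional, Tuple
--
-- Board = List[List[int]]
--
-- Pos = Tuple[int, int]
--
-- NUM_PITS = 7
--
-- def other_player(player: int) -> int:
--     return 1 - player
--
-- def pit_number_to_index(player: int, pit_number: int) -> int:
--     if player == 0:
--         return NUM_PITS - pit_number
--     return pit_number - 1
--
-- def pit7_index(player: int) -> int:
--     return pit_number_to_index(player, 7)
--
-- def clockwise_ring() -> List[Pos]: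
--     top_row = [(1, idx) for idx in range(NUM_PITS)]
--     bottom_row = [(0, idx) for idx in range(NUM_PITS - 1, -1, -1)]
--     return top_row + bottom_row
--
-- def steps_to_reach_opponent(player: int, pit_index: int) -> int:
--     ring = clockwise_ring()
--     start_pos = ring.index((player, pit_index))
--     pos = start_pos
--     steps = 0
--     while True:
--         pos = (pos + 1) % len(ring)
--         steps += 1
--         row, _ = ring[pos]
--         if row == other_player(player):
--             return steps
--
-- def move_can_transmit_with_selected_pit(seeds: int, player: int, pit_index: int) -> bool:
--     required_steps = steps_to_reach_opponent(player, pit_index)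
--     return seeds >= required_steps
--
-- def can_transmit(board: Board, player: int) -> bool:
--     idx7 = pit7_index(player)
--     for pit_index in range(NUM_PITS):
--         seeds = board[player][pit_index]
--         if seeds == 0:
--             continue
--         if pit_index == idx7 and seeds == 1:
--             continue
--         if move_can_transmit_with_selected_pit(seeds, player, pit_index):
--             return True
--     return False
-- ===== SOURCE B (Python) =====
-- def can_transmit(board, player):
--     # Closed form: from pit i it takes i + 1 steps (player 0) or 7 - i steps
--     # (player 1) to reach the opponent's row, so no ring walk is needed.
--     idx7 = 0 if player == 0 else 6
--     row = board[player]
--     for i in range(7):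
--         seeds = row[i]
--         if seeds != 0 and not (i == idx7 and seeds == 1) \
--                 and seeds >= (7 - i if player == 1 else i + 1):
--             return True
--     return False
-- ===== Notes on version B (the rewrite author's own statement) =====
-- stated objective: simpler
-- what changed: Replaces the ring list, its linear index search and the while-walk with the closed-form step count (i+1 for player 0, 7-i for player 1) tested inline in a single guarded loop over the seven pits.
import Mathlib
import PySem

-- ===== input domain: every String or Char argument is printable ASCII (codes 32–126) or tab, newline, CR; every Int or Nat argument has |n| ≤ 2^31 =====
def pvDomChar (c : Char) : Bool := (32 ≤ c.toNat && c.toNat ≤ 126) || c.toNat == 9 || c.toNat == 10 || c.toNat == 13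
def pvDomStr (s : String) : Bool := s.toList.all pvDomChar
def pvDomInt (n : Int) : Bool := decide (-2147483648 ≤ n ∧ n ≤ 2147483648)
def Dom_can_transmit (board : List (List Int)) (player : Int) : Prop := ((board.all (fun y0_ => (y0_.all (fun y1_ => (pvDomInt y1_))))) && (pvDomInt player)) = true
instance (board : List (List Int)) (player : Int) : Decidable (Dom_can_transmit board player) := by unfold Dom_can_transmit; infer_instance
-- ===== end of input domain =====

-- B eliminates A's ring list, the linear index search and the while-walk, using the
-- closed-form step count (i+1 for player 0, 7-i for player 1) in a single any().

-- B eliminates A's ring list, its linear index search and the while-walk, using the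
-- closed-form step count (i+1 for player 0, 7-i for player 1) in one guarded loop.

-- ===== PORT A =====
def other_player (player : Int) : Int := 1 - player

def pit_number_to_index (player pit_number : Int) : Int :=
  if player = 0 then 7 - pit_number else pit_number - 1

def pit7_index (player : Int) : Int := pit_number_to_index player 7

def clockwise_ring : List (Int × Int) :=
  ((PySem.List.pyRange 0 7 1).map (fun idx => ((1 : Int), idx))) ++
  ((PySem.List.pyRange 6 (-1) (-1)).map (fun idx => ((0 : Int), idx)))

-- while-True walk; fuel = ring length suffices (a pit of the other player's row is
-- reached within one lap whenever player ∈ {0,1}, which Pre_ guarantees at every call)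
def stepsLoop (player : Int) (ring : List (Int × Int)) : Nat → Int → Int → Int
  | 0, _, steps => steps          -- fuel exhausted: unreachable under Pre_
  | fuel + 1, pos, steps =>
    let pos' := PySem.Int.mod (pos + 1) (ring.length : Int)
    let steps' := steps + 1
    match PySem.List.pyGet? ring pos' with
    | none => steps'              -- unreachable: pos' is in range
    | some rp =>
      if rp.1 = other_player player then steps'
      else stepsLoop player ring fuel pos' steps'

def steps_to_reach_opponent (player pit_index : Int) : Int :=
  let ring := clockwise_ring
  match PySem.List.index? ring (player, pit_index) with
  | none => 0                     -- ValueError in Python; excluded by Pre_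
  | some start => stepsLoop player ring ring.length (start : Int) 0

def move_can_transmit_with_selected_pit (seeds player pit_index : Int) : Bool :=
  decide (seeds ≥ steps_to_reach_opponent player pit_index)

def ctLoop (board : List (List Int)) (player idx7 : Int) : List Int → Bool
  | [] => false
  | pit :: rest =>
    match PySem.List.pyGet? board player with
    | none => false               -- IndexError; excluded by Pre_
    | some row =>
      match PySem.List.pyGet? row pit with
      | none => false             -- IndexError; excluded by Pre_
      | some seeds =>
        if seeds = 0 then ctLoop board player idx7 rest
        else if pit = idx7 ∧ seeds = 1 then ctLoop board player idx7 rest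
        else if move_can_transmit_with_selected_pit seeds player pit then true
        else ctLoop board player idx7 rest

def can_transmit (board : List (List Int)) (player : Int) : Bool :=
  let idx7 := pit7_index player
  ctLoop board player idx7 (PySem.List.pyRange 0 7 1)

-- ===== PORT B =====
def altLoop (row : List Int) (player idx7 : Int) : List Int → Bool
  | [] => false
  | i :: rest =>
    match PySem.List.pyGet? row i with
    | none => false               -- IndexError; excluded by Pre_
    | some seeds =>
      if seeds ≠ 0 ∧ ¬(i = idx7 ∧ seeds = 1) ∧
          (if player = 1 then 7 - i else i + 1) ≤ seeds
      then true
      else altLoop row player idx7 rest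

def can_transmit_alt (board : List (List Int)) (player : Int) : Bool :=
  let idx7 : Int := if player = 0 then 0 else 6
  match PySem.List.pyGet? board player with
  | none => false                 -- IndexError; excluded by Pre_
  | some row => altLoop row player idx7 (PySem.List.pyRange 0 7 1)

-- ===== PRECONDITION & SPEC =====
-- Pre_ admits exactly the inputs on which Python A returns normally: board[player]
-- must exist; for player 0/1 the row must have 7 pits or contain an earlier movable
-- pit that already reaches the opponent (A returns True before the IndexError);
-- for any other player every one of the 7 pits must be skipped by the guards
-- (A returns False; one movable pit would hit ring.index's ValueError).
def Pre_can_transmit (board : List (List Int)) (player : Int) : Prop :=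
  PySem.Raise.InRange board.length player ∧
  (let row := PySem.List.pyGetD board player []
   if player = 0 ∨ player = 1 then
     7 ≤ row.length ∨ ∃ k ∈ List.range 7, k < row.length ∧
       row.getD k 0 ≠ 0 ∧
       ¬((k : Int) = (if player = 0 then 0 else 6) ∧ row.getD k 0 = 1) ∧
       (if player = 1 then 7 - (k : Int) else (k : Int) + 1) ≤ row.getD k 0
   else
     7 ≤ row.length ∧ ∀ k ∈ List.range 7, row.getD k 0 = 0 ∨ (k = 6 ∧ row.getD k 0 = 1))
instance (board : List (List Int)) (player : Int) : Decidable (Pre_can_transmit board player) := by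
  unfold Pre_can_transmit; infer_instance

def pvWitness_can_transmit : List (List Int) × Int :=
  ([[0, 1, 0, 2, 0, 0, 1], [3, 0, 0, 0, 0, 0, 0]], 1)

def Spec_can_transmit (board : List (List Int)) (player : Int) (out : Bool) : Prop := out = can_transmit_alt board player
instance (board : List (List Int)) (player : Int) (out : Bool) : Decidable (Spec_can_transmit board player out) := by unfold Spec_can_transmit; infer_instance

-- ===== CLAIM (what is proved, stated in full; the proofs are below) =====
def Claim_equal_can_transmit : Prop := ∀ (board : List (List Int)) (player : Int), Dom_can_transmit board player → Pre_can_transmit board player → Spec_can_transmit board player (can_transmit board player)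

-- ===== LEMMAS AND PROOFS =====

-- A's per-pit loop, characterised: it scans the pits until the first unreadable
-- index (where the port returns false) and otherwise tests each pit's guards.
theorem ctLoop_spec (board : List (List Int)) (player idx7 : Int) (row : List Int)
    (h1 : PySem.List.pyGet? board player = some row) :
    ∀ pits : List Int, ctLoop board player idx7 pits =
      (pits.takeWhile (fun pit => (PySem.List.pyGet? row pit).isSome)).any (fun pit =>
        match PySem.List.pyGet? row pit with
        | none => false
        | some s => !decide (s = 0) && !(decide (pit = idx7) && decide (s = 1)) &&
                    move_can_transmit_with_selected_pit s player pit)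
  | [] => by simp [ctLoop]
  | pit :: rest => by
      cases hs : PySem.List.pyGet? row pit with
      | none => simp [ctLoop, h1, hs]
      | some s =>
        simp only [ctLoop, h1, hs, List.takeWhile_cons, Option.isSome_some, if_pos,
          List.any_cons]
        rw [ctLoop_spec board player idx7 row h1 rest]
        split_ifs <;> first | tauto | (simp_all; try tauto)

-- B's loop, characterised the same way (it stops at the same unreadable index).
theorem altLoop_spec (row : List Int) (player idx7 : Int) :
    ∀ pits : List Int, altLoop row player idx7 pits =
      (pits.takeWhile (fun pit => (PySem.List.pyGet? row pit).isSome)).any (fun pit =>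
        match PySem.List.pyGet? row pit with
        | none => false
        | some s => decide (s ≠ 0 ∧ ¬(pit = idx7 ∧ s = 1) ∧
                      (if player = 1 then 7 - pit else pit + 1) ≤ s))
  | [] => by simp [altLoop]
  | pit :: rest => by
      cases hs : PySem.List.pyGet? row pit with
      | none => simp [altLoop, hs]
      | some s =>
        simp only [altLoop, hs, List.takeWhile_cons, Option.isSome_some, if_pos,
          List.any_cons]
        rw [altLoop_spec row player idx7 rest]
        by_cases hc : (s ≠ 0 ∧ ¬(pit = idx7 ∧ s = 1) ∧
            (if player = 1 then 7 - pit else pit + 1) ≤ s)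
        · rw [if_pos hc]; simp [hc]
        · rw [if_neg hc]
          simp
          intro h1 h2 h3
          exact absurd ⟨h1, by tauto, h3⟩ hc

theorem can_transmit_eq_alt_of_pre (board : List (List Int)) (player : Int)
    (h : Pre_can_transmit board player) :
    can_transmit board player = can_transmit_alt board player := by
  obtain ⟨hInR, hrest⟩ := h
  by_cases hp : player = 0 ∨ player = 1
  -- players 0 and 1: the ports agree on EVERY board (the row condition is unused)
  · clear hrest hInR
    cases hb : PySem.List.pyGet? board player with
    | none => rcases hp with hp | hp <;> subst hp <;>
        simp [can_transmit, can_transmit_alt, hb,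
          show PySem.List.pyRange 0 7 1 = [0, 1, 2, 3, 4, 5, 6] from by decide, ctLoop]
    | some row =>
      simp only [can_transmit, can_transmit_alt, hb]
      rw [ctLoop_spec _ _ _ _ hb, altLoop_spec]
      refine PySem.List.any_congr_mem ?_
      intro pit hmem
      replace hmem := (List.takeWhile_sublist _).subset hmem
      rw [show PySem.List.pyRange 0 7 1 = [0, 1, 2, 3, 4, 5, 6] from by decide] at hmem
      cases hs : PySem.List.pyGet? row pit with
      | none => rfl
      | some s =>
        rcases hp with hp | hp <;> subst hp <;> fin_cases hmem <;>
          simp [move_can_transmit_with_selected_pit, pit7_index, pit_number_to_index,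
            show ∀ k : Int, 0 ≤ k → k ≤ 6 → steps_to_reach_opponent 0 k = k + 1 from by decide,
            show ∀ k : Int, 0 ≤ k → k ≤ 6 → steps_to_reach_opponent 1 k = 7 - k from by decide] <;>
          simp [Bool.and_assoc]
  -- any other player: Pre_ says all seven pits are readable and skipped, both false
  · rw [if_neg hp] at hrest
    have hp0 : player ≠ 0 := fun h => hp (Or.inl h)
    have hp1 : player ≠ 1 := fun h => hp (Or.inr h)
    obtain ⟨h7, hall⟩ := hrest
    cases hb : PySem.List.pyGet? board player with
    | none => exact absurd ((PySem.List.pyGet?_eq_none_iff _ _).mp hb) (not_not_intro hInR)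
    | some row =>
      have hbd : PySem.List.pyGetD board player ([] : List Int) = row := by
        simp [PySem.List.pyGetD, PySem.List.pyGet?] at hb ⊢
        simp [hb]
      rw [hbd] at hall h7
      simp only [can_transmit, can_transmit_alt, hb]
      rw [ctLoop_spec _ _ _ _ hb, altLoop_spec]
      refine PySem.List.any_congr_mem ?_
      intro pit hmem
      replace hmem := (List.takeWhile_sublist _).subset hmem
      rw [show PySem.List.pyRange 0 7 1 = [0, 1, 2, 3, 4, 5, 6] from by decide] at hmem
      cases hs : PySem.List.pyGet? row pit with
      | none => rfl
      | some s =>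
        have hsteps : ∀ p : Int, steps_to_reach_opponent player p = 0 := by
          intro p
          rw [steps_to_reach_opponent]
          have hnone : PySem.List.index? clockwise_ring (player, p) = none := by
            rw [PySem.List.index?_eq_none_iff]
            intro hmem2
            simp [clockwise_ring,
              show PySem.List.pyRange 0 7 1 = [0, 1, 2, 3, 4, 5, 6] from by decide,
              show PySem.List.pyRange 6 (-1) (-1) = [6, 5, 4, 3, 2, 1, 0] from by decide]
              at hmem2
            omega
          rw [PySem.List.index?_eq_idxOf?] at hnone
          simp [hnone]
        fin_cases hmem
        · have hseed := hall 0 (by decide)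
          rw [show ((0:Int)) = ((0:Nat):Int) from rfl, PySem.List.pyGet?_natCast] at hs
          rw [show row.getD 0 0 = s from by simp [List.getD, hs]] at hseed
          have hs0 : s = 0 := by simpa using hseed
          simp [hs0]
        · have hseed := hall 1 (by decide)
          rw [show ((1:Int)) = ((1:Nat):Int) from rfl, PySem.List.pyGet?_natCast] at hs
          rw [show row.getD 1 0 = s from by simp [List.getD, hs]] at hseed
          have hs0 : s = 0 := by simpa using hseed
          simp [hs0]
        · have hseed := hall 2 (by decide)
          rw [show ((2:Int)) = ((2:Nat):Int) from rfl, PySem.List.pyGet?_natCast] at hs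
          rw [show row.getD 2 0 = s from by simp [List.getD, hs]] at hseed
          have hs0 : s = 0 := by simpa using hseed
          simp [hs0]
        · have hseed := hall 3 (by decide)
          rw [show ((3:Int)) = ((3:Nat):Int) from rfl, PySem.List.pyGet?_natCast] at hs
          rw [show row.getD 3 0 = s from by simp [List.getD, hs]] at hseed
          have hs0 : s = 0 := by simpa using hseed
          simp [hs0]
        · have hseed := hall 4 (by decide)
          rw [show ((4:Int)) = ((4:Nat):Int) from rfl, PySem.List.pyGet?_natCast] at hs
          rw [show row.getD 4 0 = s from by simp [List.getD, hs]] at hseed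
          have hs0 : s = 0 := by simpa using hseed
          simp [hs0]
        · have hseed := hall 5 (by decide)
          rw [show ((5:Int)) = ((5:Nat):Int) from rfl, PySem.List.pyGet?_natCast] at hs
          rw [show row.getD 5 0 = s from by simp [List.getD, hs]] at hseed
          have hs0 : s = 0 := by simpa using hseed
          simp [hs0]
        · have hseed := hall 6 (by decide)
          rw [show ((6:Int)) = ((6:Nat):Int) from rfl, PySem.List.pyGet?_natCast] at hs
          rw [show row.getD 6 0 = s from by simp [List.getD, hs]] at hseed
          have hs01 : s = 0 ∨ s = 1 := by simpa using hseed
          rcases hs01 with h6 | h6 <;>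
            simp [h6, pit7_index, pit_number_to_index, hp0]

-- ===== VERDICT (by name: the statement is the Claim_ definition above) =====
theorem can_transmit_spec : Claim_equal_can_transmit := by
  intro board player _ hpre
  unfold Spec_can_transmit
  exact can_transmit_eq_alt_of_pre board player hpre
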